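-- pv_equiv track=rewrite | github.com/marimemad/Algorithms-and-Data-Structures-training-IEEE-CS-ZSB | Day_8/Snacktower.py | snacktower
-- ===== SOURCE A (Python) =====
-- def snacktower(array):
--     result=[]
--     panddind=[]
--     maax=max(array)
--
--     for i in array:
--
--         if i==maax:
--             result.append(i)
--             maax-=1
--             for _ in range(len(panddind)):
--                 if maax in panddind:
--                     result.append(maax)
--                     panddind.remove(maax)
--                     maax-=1
--
--         else:
--             result.append('\n')
--             panddind.append(i)
--
--
--     result=' '.join(list(map(str,result)))
--
--     return(result)
-- ===== SOURCE B (Python) =====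
-- def snacktower(array):
--     # First-occurrence index of every value.
--     first = {}
--     for idx, v in enumerate(array):
--         if v not in first:
--             first[v] = idx
--     # Sweep values downward from the maximum, grouping them into print runs:
--     # value v becomes printable at step max(first[w] for w in [v..max]); a new
--     # run starts whenever that running maximum jumps.
--     runs = []  # (trigger index, descending consecutive values), triggers increasing
--     v = max(array)
--     while v in first:
--         ft = first[v]
--         if runs and ft < runs[-1][0]:
--             runs[-1][1].append(v)
--         else:
--             runs.append((ft, [v]))
--         v -= 1
--     # Emit: at each index either its run or a blank-line marker.
--     pieces = []
--     for idx in range(len(array)):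
--         if runs and runs[0][0] == idx:
--             pieces.extend(map(str, runs[0][1]))
--             runs.pop(0)
--         else:
--             pieces.append('\n')
--     return ' '.join(pieces)
-- ===== Notes on version B (the rewrite author's own statement) =====
-- stated objective: faster
-- what changed: Instead of A's online countdown that rescans and edits a pending list after every match, B precomputes a first-occurrence index map, sweeps the values downward once to group them into print runs keyed by trigger index, and emits in a single pass.
-- outside the precondition, e.g. on snacktower([]): A raises ValueError, B raises ValueError
import Mathlib
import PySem

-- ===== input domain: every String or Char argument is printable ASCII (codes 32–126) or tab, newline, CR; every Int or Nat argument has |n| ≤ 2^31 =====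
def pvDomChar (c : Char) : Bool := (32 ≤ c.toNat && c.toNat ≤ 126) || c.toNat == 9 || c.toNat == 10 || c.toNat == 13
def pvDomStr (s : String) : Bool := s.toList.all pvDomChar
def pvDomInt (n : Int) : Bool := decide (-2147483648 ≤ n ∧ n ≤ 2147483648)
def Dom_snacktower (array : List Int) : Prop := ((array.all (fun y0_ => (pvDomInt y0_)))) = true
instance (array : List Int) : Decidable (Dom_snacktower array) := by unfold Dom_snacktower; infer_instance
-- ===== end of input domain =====

-- B replaces A's online countdown with pending rescans by an offline plan: a
-- first-occurrence index map, one downward sweep grouping values into print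
-- runs, then a single emission pass; proved to return the same string.

-- ===== PORT A =====
-- inner loop 'for _ in range(len(panddind)): if maax in panddind: …' ;
-- state = (result, panddind, maax); 'panddind.remove(maax)' runs under the
-- membership guard, so List.remove? is some there (remove?_eq_some_erase).
def snackAInner : Nat → List String × List Int × Int → List String × List Int × Int
  | 0, st => st
  | n + 1, (res, pend, m) =>
    if pend.contains m then
      snackAInner n (res ++ [PySem.Int.toStr m], (PySem.List.remove? pend m).getD pend, m - 1)
    else
      snackAInner n (res, pend, m)

def snackAStep (st : List String × List Int × Int) (i : Int) : List String × List Int × Int :=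
  let (res, pend, m) := st
  if i = m then
    -- result.append(i); maax -= 1; then the fuelled inner loop
    snackAInner pend.length (res ++ [PySem.Int.toStr i], pend, m - 1)
  else
    (res ++ ["\n"], pend ++ [i], m)

def snacktower (array : List Int) : String :=
  match PySem.List.max? array (fun x => x) with
  | none => ""   -- max([]) raises ValueError in Python; excluded by Pre_
  | some mx =>
    let st := array.foldl snackAStep ([], [], mx)
    PySem.Str.join " " st.1

-- ===== PORT B =====
-- 'if v not in first: first[v] = idx' over enumerate(array)
def snackBFirst (array : List Int) : PySem.Dict Int Int :=
  (PySem.List.enumerate array 0).foldl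
    (fun first p => if first.contains p.2 then first else first.insert p.2 p.1)
    PySem.Dict.empty

-- termination measure fact for the downward sweep: the number of dict keys ≤ v
-- strictly drops when v (a present key) steps to v - 1
theorem snackSweepMu_lt (first : PySem.Dict Int Int) (v ft : Int)
    (h : first.get? v = some ft) :
    ((first.keys.filter (fun k => decide (k ≤ v - 1))).length <
      (first.keys.filter (fun k => decide (k ≤ v))).length) := by
  have hv : v ∈ first.keys := by
    rw [← PySem.Dict.contains_iff_mem_keys, PySem.Dict.contains_eq_isSome_get?, h]
    rfl
  have hsub : first.keys.filter (fun k => decide (k ≤ v - 1)) =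
      (first.keys.filter (fun k => decide (k ≤ v))).filter (fun k => decide (k ≤ v - 1)) := by
    rw [List.filter_filter]
    apply List.filter_congr
    intro x _
    by_cases h1 : x ≤ v - 1 <;> by_cases h2 : x ≤ v <;> simp_all
    omega
  rw [hsub]
  exact List.length_filter_lt_length_iff_exists.mpr
    ⟨v, List.mem_filter.mpr ⟨hv, by simp⟩, by simp⟩

-- 'while v in first: ft = first[v]; join last run if ft < runs[-1][0] else open a new run'
def snackBSweep (first : PySem.Dict Int Int) (v : Int) (runs : List (Int × List Int)) :
    List (Int × List Int) :=
  match h : first.get? v with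
  | some ft =>
    let runs' :=
      match runs.getLast? with
      | some last =>
        if ft < last.1 then runs.dropLast ++ [(last.1, last.2 ++ [v])] else runs ++ [(ft, [v])]
      | none => runs ++ [(ft, [v])]
    snackBSweep first (v - 1) runs'
  | none => runs
termination_by (first.keys.filter (fun k => decide (k ≤ v))).length
decreasing_by exact snackSweepMu_lt first v ft h

-- 'if runs and runs[0][0] == idx: emit run, pop it; else emit blank marker'
def snackBEmit (st : List String × List (Int × List Int)) (idx : Int) :
    List String × List (Int × List Int) :=
  match st.2 with
  | r :: rest => if r.1 = idx then (st.1 ++ r.2.map PySem.Int.toStr, rest) else (st.1 ++ ["\n"], st.2)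
  | [] => (st.1 ++ ["\n"], [])

def snacktower_alt (array : List Int) : String :=
  match PySem.List.max? array (fun x => x) with
  | none => ""   -- max([]) raises ValueError in Python; excluded by Pre_
  | some mx =>
    let first := snackBFirst array
    let runs := snackBSweep first mx []
    let st := (PySem.List.pyRange 0 (array.length : Int) 1).foldl snackBEmit ([], runs)
    PySem.Str.join " " st.1

-- ===== PRECONDITION & SPEC =====
-- Pre_ excludes only the empty list, on which Python A (and B) raise ValueError at max(array).
def Pre_snacktower (array : List Int) : Prop := array ≠ []
instance (array : List Int) : Decidable (Pre_snacktower array) := by unfold Pre_snacktower; infer_instance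
def pvWitness_snacktower : List Int := [3, 1, 4, 1, 5, 2]

def Spec_snacktower (array : List Int) (out : String) : Prop := out = snacktower_alt array
instance (array : List Int) (out : String) : Decidable (Spec_snacktower array out) := by unfold Spec_snacktower; infer_instance

-- ===== CLAIM (what is proved, stated in full; the proofs are below) =====
def Claim_equal_snacktower : Prop := ∀ (array : List Int), Dom_snacktower array → Pre_snacktower array → Spec_snacktower array (snacktower array)

-- ===== LEMMAS AND PROOFS =====

-- [m, m-1, ..., m-n+1]
def descFrom (m : Int) : Nat → List Int
  | 0 => []
  | n + 1 => m :: descFrom (m - 1) n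

theorem length_descFrom (m : Int) (n : Nat) : (descFrom m n).length = n := by
  induction n generalizing m with
  | zero => rfl
  | succ k ih => simp [descFrom, ih]

theorem mem_descFrom (m : Int) (n : Nat) (v : Int) :
    v ∈ descFrom m n ↔ m - n < v ∧ v ≤ m := by
  induction n generalizing m with
  | zero =>
    simp [descFrom]
  | succ k ih =>
    simp only [descFrom, List.mem_cons, ih]
    push_cast
    omega

theorem descFrom_snoc (m : Int) (n : Nat) :
    descFrom m n ++ [m - n] = descFrom m (n + 1) := by
  induction n generalizing m with
  | zero => simp [descFrom]
  | succ k ih =>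
    simp only [descFrom, List.cons_append, List.cons.injEq, true_and]
    have := ih (m - 1)
    push_cast at this ⊢
    rw [show m - (↑k + 1 : Int) = m - 1 - ↑k by ring] at *
    exact this

-- chunk invariant: rs is the list of runs still to be printed, m the current
-- countdown value, k the current index; each run is a descending consecutive
-- block headed by the value whose first occurrence is the run's trigger index.
def ChunkInv (a : List Int) : Nat → List (Int × List Int) → Int → Prop
  | _, [], m => m ∉ a
  | k, (t, c) :: more, m =>
      ∃ tn : Nat, t = (tn : Int) ∧ k ≤ tn ∧
        PySem.List.index? a m = some tn ∧
        c = descFrom m c.length ∧ c ≠ [] ∧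
        (∀ v ∈ c, ∃ j : Nat, PySem.List.index? a v = some j ∧ j ≤ tn) ∧
        ChunkInv a (tn + 1) more (m - c.length)

-- membership in a prefix, via first-occurrence indices
theorem mem_take_of_index?_lt {a : List Int} {v : Int} {j k : Nat}
    (h : PySem.List.index? a v = some j) (hjk : j < k) : v ∈ a.take k := by
  obtain ⟨hk, hval, _⟩ := PySem.List.getElem_of_index?_eq_some h
  exact List.mem_take_iff_getElem.mpr ⟨j, by omega, hval⟩

theorem not_mem_take_of_index?_ge {a : List Int} {v : Int} {j k : Nat}
    (h : PySem.List.index? a v = some j) (hjk : k ≤ j) : v ∉ a.take k := by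
  intro hmem
  obtain ⟨i, hi, hval⟩ := List.mem_take_iff_getElem.mp hmem
  obtain ⟨hk, _, hmin⟩ := PySem.List.getElem_of_index?_eq_some h
  exact hmin i (by omega) hval

theorem getElem_ne_of_index?_gt {a : List Int} {v : Int} {j k : Nat}
    (h : PySem.List.index? a v = some j) (hk : k < j) (hka : k < a.length) :
    a[k] ≠ v := by
  obtain ⟨_, _, hmin⟩ := PySem.List.getElem_of_index?_eq_some h
  exact hmin k hk

theorem chunkInv_not_mem_take {a : List Int} {k : Nat} {rs : List (Int × List Int)} {m : Int}
    (h : ChunkInv a k rs m) : m ∉ a.take k := by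
  match rs with
  | [] => exact fun hm => h (List.mem_of_mem_take hm)
  | (t, c) :: more =>
    obtain ⟨tn, _, hkt, hidx, _⟩ := h
    exact not_mem_take_of_index?_ge hidx hkt

-- once maax is absent from panddind, the remaining fuel does nothing
theorem snackAInner_stall (n : Nat) (res : List String) (pend : List Int) (m : Int)
    (h : ¬ m ∈ pend) : snackAInner n (res, pend, m) = (res, pend, m) := by
  induction n with
  | zero => rfl
  | succ k ih =>
    simp only [snackAInner, List.contains_eq_mem, decide_eq_true_eq, if_neg h]
    exact ih

-- A's inner loop drains exactly a descending consecutive block present in pend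
theorem drainRun (d : List Int) :
    ∀ (res : List String) (pend : List Int) (q : Int),
      d = descFrom q d.length →
      (∀ v ∈ d, v ∈ pend) →
      (q - d.length) ∉ pend →
      ∃ pend', snackAInner pend.length (res, pend, q) =
          (res ++ d.map PySem.Int.toStr, pend', q - d.length) ∧
        ∀ v : Int, v ≤ q - d.length → (v ∈ pend' ↔ v ∈ pend) := by
  induction d with
  | nil =>
    intro res pend q _ _ hnot
    refine ⟨pend, ?_, fun v _ => Iff.rfl⟩
    rw [snackAInner_stall _ _ _ _ (by simpa using hnot)]
    simp
  | cons x d' ih =>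
    intro res pend q hdesc hmem hnot
    simp only [List.length_cons, descFrom] at hdesc
    obtain ⟨hx, hd'⟩ : x = q ∧ d' = descFrom (q - 1) d'.length := by
      exact ⟨by injection hdesc, by injection hdesc⟩
    subst hx
    have hqpend : x ∈ pend := hmem x List.mem_cons_self
    have hpos : 0 < pend.length := List.length_pos_of_mem hqpend
    obtain ⟨n, hn⟩ : ∃ n, pend.length = n + 1 := ⟨pend.length - 1, by omega⟩
    have hrem : PySem.List.remove? pend x = some (pend.erase x) :=
      PySem.List.remove?_eq_some_erase pend x hqpend
    have hlen : (pend.erase x).length = n := by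
      rw [List.length_erase_of_mem hqpend]; omega
    have harith : (x - 1) - (d'.length : Int) = x - ((x :: d').length : Int) := by
      simp only [List.length_cons]; push_cast; ring
    have hmem' : ∀ v ∈ d', v ∈ pend.erase x := by
      intro v hv
      have hvle : v ≤ x - 1 := ((mem_descFrom _ _ _).mp (hd' ▸ hv)).2
      exact (List.mem_erase_of_ne (by omega)).mpr (hmem v (List.mem_cons_of_mem _ hv))
    have hnot' : (x - 1) - (d'.length : Int) ∉ pend.erase x := by
      rw [harith]
      exact fun hv => hnot (List.mem_of_mem_erase hv)
    obtain ⟨pend', heq, hiff⟩ := ih (res ++ [PySem.Int.toStr x]) (pend.erase x) (x - 1) hd' hmem' hnot'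
    refine ⟨pend', ?_, ?_⟩
    · rw [hn]
      simp only [snackAInner, List.contains_eq_mem, decide_eq_true_eq, if_pos hqpend, hrem,
        Option.getD_some]
      rw [← hlen, heq, harith]
      simp
    · intro v hv
      rw [← harith] at hv
      rw [hiff v hv, List.mem_erase_of_ne (by omega)]

-- first-occurrence dict characterization
theorem snackBFirstAux (a : List Int) :
    ∀ (s : Int) (d : PySem.Dict Int Int) (v : Int),
      ((PySem.List.enumerate a s).foldl
          (fun f p => if f.contains p.2 then f else f.insert p.2 p.1) d).get? v =
        if (d.get? v).isSome then d.get? v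
        else (PySem.List.index? a v).map (fun j => s + (j : Int)) := by
  induction a with
  | nil =>
    intro s d v
    have hidx : PySem.List.index? ([] : List Int) v = none := by
      rw [PySem.List.index?_eq_none_iff]; simp
    rw [hidx]
    cases h : d.get? v <;> simp [PySem.List.enumerate_nil, h]
  | cons x rest ih =>
    intro s d v
    rw [PySem.List.enumerate_cons]
    simp only [List.foldl_cons]
    rw [ih (s + 1) (if d.contains x then d else d.insert x s) v]
    by_cases hvx : v = x
    · subst hvx
      by_cases hc : d.contains v
      · have hs : (d.get? v).isSome = true := by
          rw [← PySem.Dict.contains_eq_isSome_get?]; exact hc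
        simp [hc, hs]
      · have hs : (d.get? v).isSome = false := by
          rw [← PySem.Dict.contains_eq_isSome_get?]; simpa using hc
        have hc' : d.contains v = false := by simpa using hc
        rw [PySem.List.index?_cons_self]
        simp [hc', PySem.Dict.get?_insert_self, hs]
    · have hd1 : (if d.contains x then d else d.insert x s).get? v = d.get? v := by
        split
        · rfl
        · exact PySem.Dict.get?_insert_of_ne d s hvx
      rw [hd1, PySem.List.index?_cons_of_ne rest (fun h => hvx h.symm),
        PySem.List.index?_eq_idxOf?]
      cases hs : (d.get? v).isSome with
      | true => simp
      | false =>
        simp only [Bool.false_eq_true, if_false]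
        cases hidx : List.idxOf? v rest with
        | none => simp
        | some j =>
          simp
          ring
theorem snackBFirst_get? (a : List Int) (v : Int) :
    (snackBFirst a).get? v = (PySem.List.index? a v).map (fun j => (j : Int)) := by
  rw [snackBFirst, snackBFirstAux a 0 PySem.Dict.empty v]
  simp [PySem.Dict.get?_empty]

-- the sweep with an open last run, as structural recursion on the open run
def sweepGo (first : PySem.Dict Int Int) (v : Int) (t : Int) (c : List Int) :
    List (Int × List Int) :=
  match h : first.get? v with
  | some ft =>
    if ft < t then sweepGo first (v - 1) t (c ++ [v]) else (t, c) :: sweepGo first (v - 1) ft [v]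
  | none => [(t, c)]
termination_by (first.keys.filter (fun k => decide (k ≤ v))).length
decreasing_by
  · exact snackSweepMu_lt first v ft h
  · exact snackSweepMu_lt first v ft h

theorem sweep_open (first : PySem.Dict Int Int) :
    ∀ (v : Int) (t : Int) (c : List Int) (rs : List (Int × List Int)),
      snackBSweep first v (rs ++ [(t, c)]) = rs ++ sweepGo first v t c := by
  intro v t c
  fun_induction sweepGo first v t c with
  | case1 v t c ft h hlt ih =>
    intro rs
    rw [snackBSweep, h]
    simp only [List.getLast?_concat, List.dropLast_concat, hlt]
    exact ih rs
  | case2 v t c ft h hlt ih =>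
    intro rs
    rw [snackBSweep, h]
    simp only [List.getLast?_concat, List.dropLast_concat, if_neg hlt]
    rw [ih (rs ++ [(t, c)])]
    simp
  | case3 v t c h =>
    intro rs
    rw [snackBSweep, h]

theorem descFrom_ne_nil (m : Int) (n : Nat) (h : 0 < n) : descFrom m n ≠ [] := by
  cases n
  · omega
  · simp [descFrom]

theorem sweepGo_chunkInv_aux (a : List Int) (first : PySem.Dict Int Int)
    (hf : ∀ v, first.get? v = (PySem.List.index? a v).map (fun j => (j : Int))) :
    ∀ (mu : Nat) (m : Int) (len tn k : Nat),
      (first.keys.filter (fun x => decide (x ≤ m - (len : Int)))).length = mu →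
      0 < len →
      PySem.List.index? a m = some tn → k ≤ tn →
      (∀ w ∈ descFrom m len, ∃ j : Nat, PySem.List.index? a w = some j ∧ j ≤ tn) →
      ChunkInv a k (sweepGo first (m - len) (tn : Int) (descFrom m len)) m := by
  intro mu
  induction mu using Nat.strong_induction_on with
  | _ mu IH =>
    intro m len tn k hmu hlen hidx hk hall
    cases hget : first.get? (m - (len : Int)) with
    | none =>
      rw [sweepGo, hget]
      have hnotmem : m - (len : Int) ∉ a := by
        have := hf (m - (len : Int))
        rw [hget] at this
        cases hcase : PySem.List.index? a (m - (len : Int)) with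
        | none => exact (PySem.List.index?_eq_none_iff _ _).mp hcase
        | some j => rw [hcase] at this; simp at this
      refine ⟨tn, rfl, hk, hidx, ?_, descFrom_ne_nil m len hlen, hall, ?_⟩
      · rw [length_descFrom]
      · rw [length_descFrom]
        exact hnotmem
    | some ft =>
      have hjv := hf (m - (len : Int))
      rw [hget] at hjv
      obtain ⟨jv, hjvidx, hftjv⟩ : ∃ jv : Nat,
          PySem.List.index? a (m - (len : Int)) = some jv ∧ ft = (jv : Int) := by
        cases hcase : PySem.List.index? a (m - (len : Int)) with
        | none => rw [hcase] at hjv; simp at hjv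
        | some j => rw [hcase] at hjv; exact ⟨j, rfl, by simpa using hjv⟩
      have hmuLt := snackSweepMu_lt first (m - (len : Int)) ft hget
      by_cases hlt : ft < (tn : Int)
      · rw [sweepGo, hget]
        simp only [if_pos hlt]
        rw [descFrom_snoc m len]
        have harith : m - (len : Int) - 1 = m - ((len + 1 : Nat) : Int) := by push_cast; ring
        rw [harith]
        refine IH _ (by rw [← hmu, ← harith]; exact hmuLt) m (len + 1) tn k rfl (by omega) hidx hk ?_
        intro w hw
        rw [← descFrom_snoc m len] at hw
        rcases List.mem_append.mp hw with hw | hw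
        · exact hall w hw
        · have : w = m - (len : Int) := by simpa using hw
          exact this ▸ ⟨jv, hjvidx, by omega⟩
      · rw [sweepGo, hget]
        simp only [if_neg hlt]
        have hjvtn : tn < jv := by
          have hge : (tn : Int) ≤ (jv : Int) := by omega
          have hne : jv ≠ tn := by
            intro hEq
            obtain ⟨_, hvm, _⟩ := PySem.List.getElem_of_index?_eq_some hidx
            obtain ⟨_, hvl, _⟩ := PySem.List.getElem_of_index?_eq_some (hEq ▸ hjvidx)
            rw [hvm] at hvl
            omega
          omega
        refine ⟨tn, rfl, hk, hidx, by rw [length_descFrom], descFrom_ne_nil m len hlen, hall, ?_⟩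
        rw [length_descFrom]
        have h1 : descFrom (m - (len : Int)) 1 = [m - (len : Int)] := rfl
        have harith : m - (len : Int) - ((1 : Nat) : Int) = m - (len : Int) - 1 := by push_cast; ring
        have := IH _ (by rw [← hmu]; simpa using hmuLt) (m - (len : Int)) 1 jv (tn + 1)
          rfl (by omega) hjvidx (by omega)
          (by intro w hw; rw [h1] at hw; simp at hw; exact hw ▸ ⟨jv, hjvidx, le_refl jv⟩)
        rw [h1, harith] at this
        exact hftjv ▸ this

theorem sweepGo_chunkInv (a : List Int) (first : PySem.Dict Int Int)
    (hf : ∀ v, first.get? v = (PySem.List.index? a v).map (fun j => (j : Int))) :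
    ∀ (m : Int) (len tn k : Nat), 0 < len →
      PySem.List.index? a m = some tn → k ≤ tn →
      (∀ w ∈ descFrom m len, ∃ j : Nat, PySem.List.index? a w = some j ∧ j ≤ tn) →
      ChunkInv a k (sweepGo first (m - len) (tn : Int) (descFrom m len)) m := by
  intro m len tn k hlen hidx hk hall
  exact sweepGo_chunkInv_aux a first hf _ m len tn k rfl hlen hidx hk hall

-- main induction: A's fold over the remaining elements and B's emission fold
-- over the remaining indices produce the same pieces
theorem mainEq (a : List Int) :
    ∀ (fuel k : Nat), a.length - k = fuel →
    ∀ (res : List String) (pend : List Int) (m : Int) (rs : List (Int × List Int)),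
      (∀ v : Int, v ≤ m → (v ∈ pend ↔ v ∈ a.take k)) →
      ChunkInv a k rs m →
      ((a.drop k).foldl snackAStep (res, pend, m)).1 =
      ((PySem.List.pyRange (k : Int) (a.length : Int) 1).foldl snackBEmit (res, rs)).1 := by
  intro fuel
  induction fuel with
  | zero =>
    intro k hfuel res pend m rs h1 h2
    have hk : a.length ≤ k := by omega
    rw [List.drop_eq_nil_iff.mpr (by omega),
      PySem.List.pyRange_one_eq_nil (by exact_mod_cast hk)]
    rfl
  | succ f ih =>
    intro k hfuel res pend m rs h1 h2
    have hk : k < a.length := by omega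
    have hdrop : a.drop k = a[k] :: a.drop (k + 1) := List.drop_eq_getElem_cons hk
    have hrange : PySem.List.pyRange (k : Int) (a.length : Int) 1 =
        (k : Int) :: PySem.List.pyRange ((k + 1 : Nat) : Int) (a.length : Int) 1 := by
      rw [PySem.List.pyRange_one_cons (by exact_mod_cast hk)]
      norm_cast
    have htake : a.take (k + 1) = a.take k ++ [a[k]] := by
      rw [List.take_add_one, List.getElem?_eq_getElem hk]
      rfl
    have htakemono : ∀ v : Int, v ∈ a.take k → v ∈ a.take (k + 1) := by
      intro v hv
      rw [htake]
      exact List.mem_append_left _ hv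
    rw [hdrop, hrange]
    simp only [List.foldl_cons]
    match rs, h2 with
    | [], h2 =>
      have hm : m ∉ a := h2
      have hne : a[k] ≠ m := fun h => hm (h ▸ List.getElem_mem hk)
      rw [show snackAStep (res, pend, m) a[k] = (res ++ ["\n"], pend ++ [a[k]], m) from by
        simp [snackAStep, hne]]
      rw [show snackBEmit (res, []) (k : Int) = (res ++ ["\n"], []) from rfl]
      refine ih (k + 1) (by omega) _ _ m [] ?_ h2
      intro v hv
      rw [htake]
      simp only [List.mem_append, List.mem_singleton, h1 v hv]
    | (t, c) :: more, h2 =>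
      obtain ⟨tn, rfl, hkt, hidxm, hcdesc, hcne, hcall, hnest⟩ := h2
      by_cases htrig : tn = k
      · subst htrig
        obtain ⟨hlt2, hak, _⟩ := PySem.List.getElem_of_index?_eq_some hidxm
        obtain ⟨lc, hc⟩ : ∃ lc, c.length = lc + 1 := by
          cases hclen : c.length
          · exact absurd (List.eq_nil_of_length_eq_zero hclen) hcne
          · exact ⟨_, rfl⟩
        have hcform : c = m :: descFrom (m - 1) lc := by rw [hcdesc, hc]; rfl
        set d := descFrom (m - 1) lc with hd
        have hdlen : d.length = lc := length_descFrom _ _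
        have hdmem : ∀ v ∈ d, v ∈ pend := by
          intro v hv
          have hvc : v ∈ c := by rw [hcform]; exact List.mem_cons_of_mem _ hv
          have hvle : v ≤ m - 1 := ((mem_descFrom _ _ _).mp hv).2
          obtain ⟨j, hj, hjle⟩ := hcall v hvc
          have hjk : j < tn := by
            rcases Nat.lt_or_ge j tn with h | h
            · exact h
            · exfalso
              have hjtn : j = tn := by omega
              subst hjtn
              obtain ⟨_, hvj, _⟩ := PySem.List.getElem_of_index?_eq_some hj
              obtain ⟨_, hm2, _⟩ := PySem.List.getElem_of_index?_eq_some hidxm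
              have : v = m := hvj.symm.trans hm2
              omega
          exact (h1 v (by omega)).mpr (mem_take_of_index?_lt hj hjk)
        have harith : m - 1 - (d.length : Int) = m - (c.length : Int) := by
          rw [hdlen, hc]; push_cast; ring
        have hstop : (m - 1 - (d.length : Int)) ∉ pend := by
          rw [harith]
          intro hmem
          have h1' : m - (c.length : Int) ≤ m := by
            have : 0 < c.length := by omega
            omega
          have := (h1 _ h1').mp hmem
          exact chunkInv_not_mem_take hnest (htakemono _ this)
        obtain ⟨pend', heq, hiff⟩ := drainRun d (res ++ [PySem.Int.toStr m]) pend (m - 1)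
          (by rw [hdlen]) hdmem hstop
        rw [show snackAStep (res, pend, m) a[tn] =
            snackAInner pend.length (res ++ [PySem.Int.toStr m], pend, m - 1) from by
          simp [snackAStep, hak]]
        rw [heq]
        rw [show snackBEmit (res, ((tn : Int), c) :: more) (tn : Int) =
            (res ++ c.map PySem.Int.toStr, more) from by simp [snackBEmit]]
        have hres : res ++ [PySem.Int.toStr m] ++ d.map PySem.Int.toStr =
            res ++ c.map PySem.Int.toStr := by
          rw [hcform]
          simp
        rw [hres, harith]
        refine ih (tn + 1) (by omega) _ pend' _ more ?_ ?_
        · intro v hv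
          have hvm : v ≤ m - 1 - (d.length : Int) := by rw [harith]; exact hv
          rw [hiff v hvm, h1 v (by rw [harith] at hvm; omega), htake, List.mem_append]
          have hvne : v ≠ a[tn] := by
            rw [hak]
            have : 0 < c.length := by omega
            omega
          simp [hvne]
        · exact hnest
      · have hkt' : k < tn := by omega
        have hne : a[k] ≠ m := getElem_ne_of_index?_gt hidxm hkt' hk
        rw [show snackAStep (res, pend, m) a[k] = (res ++ ["\n"], pend ++ [a[k]], m) from by
          simp [snackAStep, hne]]
        rw [show snackBEmit (res, ((tn : Int), c) :: more) (k : Int) =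
            (res ++ ["\n"], ((tn : Int), c) :: more) from by
          have : ((tn : Int)) ≠ (k : Int) := by exact_mod_cast htrig
          simp [snackBEmit, this]]
        refine ih (k + 1) (by omega) _ _ m _ ?_ ⟨tn, rfl, by omega, hidxm, hcdesc, hcne, hcall, hnest⟩
        intro v hv
        rw [htake]
        simp only [List.mem_append, List.mem_singleton, h1 v hv]

-- ===== VERDICT (by name: the statement is the Claim_ definition above) =====
theorem snacktower_spec : Claim_equal_snacktower := by
  intro array _ _
  unfold Spec_snacktower snacktower snacktower_alt
  cases hmx : PySem.List.max? array (fun x => x) with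
  | none => rfl
  | some mx =>
    simp only []
    have hf := snackBFirst_get? array
    have hmem : mx ∈ array := PySem.List.max?_mem hmx
    obtain ⟨t0, ht0⟩ : ∃ t0, PySem.List.index? array mx = some t0 := by
      cases h : PySem.List.index? array mx with
      | none => exact absurd ((PySem.List.index?_eq_none_iff _ _).mp h) (by simpa using hmem)
      | some j => exact ⟨j, rfl⟩
    have hget : (snackBFirst array).get? mx = some (t0 : Int) := by rw [hf, ht0]; rfl
    have hrun : snackBSweep (snackBFirst array) mx [] =
        sweepGo (snackBFirst array) (mx - 1) (t0 : Int) [mx] := by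
      rw [snackBSweep, hget]
      simp only [List.getLast?_nil, List.nil_append]
      rw [show [((t0 : Int), [mx])] = [] ++ [((t0 : Int), [mx])] from rfl, sweep_open]
      rfl
    have hinv : ChunkInv array 0 (snackBSweep (snackBFirst array) mx []) mx := by
      rw [hrun]
      have h1 : descFrom mx 1 = [mx] := rfl
      have hc := sweepGo_chunkInv array (snackBFirst array) hf mx 1 t0 0 (by omega) ht0
        (Nat.zero_le _)
        (by intro w hw; rw [h1] at hw; simp at hw; exact hw ▸ ⟨t0, ht0, le_refl _⟩)
      rw [h1] at hc
      simpa using hc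
    have hmain := mainEq array array.length 0 (by omega) [] [] mx
      (snackBSweep (snackBFirst array) mx []) (by intro v _; simp) hinv
    simp only [List.drop_zero, Nat.cast_zero] at hmain
    rw [hmain]
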